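-- pv_equiv track=rewrite | github.com/mjustynaPhD/2d-rna-analysis | rna2d/utils/utils.py | filter_common
-- ===== SOURCE A (Python) =====
-- def filter_common(subset_ids, keys: list = None):
--     sets = []
--     if keys is None:
--         keys = list(subset_ids.keys())
--     for m in keys:
--         sets.append(set(subset_ids[m]))
--     common = sets[0].intersection(*sets)
--     return common
-- ===== SOURCE B (Python) =====
-- def filter_common(subset_ids, keys: list = None):
--     if keys is None:
--         keys = list(subset_ids.keys())
--     counts = {}
--     for m in keys:
--         for x in set(subset_ids[m]):
--             counts[x] = counts.get(x, 0) + 1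
--     n = len(keys)
--     return {x for x, c in counts.items() if c == n}
-- ===== Notes on version B (the rewrite author's own statement) =====
-- stated objective: alternative
-- what changed: Instead of materialising one set per key and intersecting them, B makes a single pass building a frequency table of distinct-per-key occurrences and returns the elements whose count equals len(keys).
import Mathlib
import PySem

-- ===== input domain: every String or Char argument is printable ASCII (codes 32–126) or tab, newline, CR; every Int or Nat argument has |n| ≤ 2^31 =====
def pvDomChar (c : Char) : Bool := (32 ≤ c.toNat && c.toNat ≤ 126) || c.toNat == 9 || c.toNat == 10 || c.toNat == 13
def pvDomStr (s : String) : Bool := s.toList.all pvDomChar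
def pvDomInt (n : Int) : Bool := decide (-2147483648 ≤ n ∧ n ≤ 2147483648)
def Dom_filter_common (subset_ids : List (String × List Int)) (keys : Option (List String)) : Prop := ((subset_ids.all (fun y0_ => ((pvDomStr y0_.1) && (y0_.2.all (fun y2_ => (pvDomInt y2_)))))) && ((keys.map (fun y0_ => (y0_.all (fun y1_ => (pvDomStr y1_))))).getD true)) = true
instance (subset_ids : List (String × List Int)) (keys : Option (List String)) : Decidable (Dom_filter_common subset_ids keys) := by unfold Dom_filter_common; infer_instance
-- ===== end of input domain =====

-- B replaces "build one set per key then intersect" by a single counting pass over the keys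
-- (frequency table of distinct-per-key occurrences); objective: alternative (same cost).


-- shared helper: the Python line 'if keys is None: keys = list(subset_ids.keys())' (in both A and B)
def pvResolved (subset_ids : List (String × List Int)) (keys : Option (List String)) : List String :=
  match keys with
  | none => PySem.Dict.keys (PySem.Dict.mk subset_ids)
  | some ks => ks

-- shared helper: 'set(subset_ids[m])' (in both A and B)
def pvS (d : PySem.Dict String (List Int)) (m : String) : PySem.Set Int :=
  PySem.Set.ofList (PySem.Dict.getD d m [])

-- ===== PORT A =====
-- literal port of A: build a set per key, then sets[0].intersection(*sets).
-- subset_ids[m] (KeyError on a missing key) is ported as getD [] with Pre_ excluding missing keys;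
-- sets[0] on empty sets (IndexError) is the [] match arm, also excluded by Pre_.
def filter_common (subset_ids : List (String × List Int)) (keys : Option (List String)) : List Int :=
  let d := PySem.Dict.mk subset_ids
  let ks := pvResolved subset_ids keys
  let sets : List (PySem.Set Int) := ks.foldl (fun acc m => acc ++ [pvS d m]) []
  match sets with
  | [] => []
  | s0 :: _ => sets.foldl (fun acc s => PySem.Set.inter acc s) s0

-- ===== PORT B =====
-- literal port of B: one pass over keys, counting each distinct element of subset_ids[m];
-- result = elements whose count equals len(keys).
def filter_common_alt (subset_ids : List (String × List Int)) (keys : Option (List String)) : List Int :=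
  let d := PySem.Dict.mk subset_ids
  let ks := pvResolved subset_ids keys
  let counts : PySem.Dict Int Int :=
    ks.foldl (fun c m => (pvS d m).foldl (fun c x => c.insert x (c.getD x 0 + 1)) c)
      PySem.Dict.empty
  let n : Int := (ks.length : Int)
  (counts.items.filter (fun p => p.2 == n)).map (fun p => p.1)

-- ===== PRECONDITION & SPEC =====
-- Pre_ excludes exactly the inputs where Python A raises: an empty resolved key list
-- (IndexError on sets[0]) and a key absent from subset_ids (KeyError).
def Pre_filter_common (subset_ids : List (String × List Int)) (keys : Option (List String)) : Prop :=
  pvResolved subset_ids keys ≠ [] ∧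
    ∀ m ∈ pvResolved subset_ids keys, (PySem.Dict.mk subset_ids).contains m = true
instance (subset_ids : List (String × List Int)) (keys : Option (List String)) : Decidable (Pre_filter_common subset_ids keys) := by unfold Pre_filter_common; infer_instance

def pvWitness_filter_common : (List (String × List Int)) × Option (List String) :=
  ([("a", [1, 2, 3]), ("b", [2, 3, 4])], some ["a", "b"])

def Spec_filter_common (subset_ids : List (String × List Int)) (keys : Option (List String)) (out : List Int) : Prop := out = filter_common_alt subset_ids keys
instance (subset_ids : List (String × List Int)) (keys : Option (List String)) (out : List Int) : Decidable (Spec_filter_common subset_ids keys out) := by unfold Spec_filter_common; infer_instance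

-- ===== CLAIM (what is proved, stated in full; the proofs are below) =====
def Claim_equal_filter_common : Prop := ∀ (subset_ids : List (String × List Int)) (keys : Option (List String)), Dom_filter_common subset_ids keys → Pre_filter_common subset_ids keys → Spec_filter_common subset_ids keys (filter_common subset_ids keys)

-- ===== LEMMAS AND PROOFS =====

-- A's intersection loop is a filter by membership in every set
theorem pv_foldl_inter (l : List (PySem.Set Int)) (s : List Int) :
    l.foldl (fun acc t => PySem.Set.inter acc t) s
      = s.filter (fun x => l.all (fun t => t.contains x)) := by
  induction l generalizing s with
  | nil => simp
  | cons t l ih =>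
      rw [List.foldl_cons, ih]
      show List.filter _ (List.filter _ s) = _
      rw [List.filter_filter]
      apply List.filter_congr
      intro x _
      simp [Bool.and_comm]

-- the counter's value at x counts the keys whose set contains x
theorem pv_counts_getD (d : PySem.Dict String (List Int)) (ks : List String)
    (c : PySem.Dict Int Int) (x : Int) :
    (ks.foldl (fun c m => (pvS d m).foldl (fun c x => c.insert x (c.getD x 0 + 1)) c) c).getD x 0
      = c.getD x 0 + (ks.countP (fun m => (pvS d m).contains x) : Int) := by
  induction ks generalizing c with
  | nil => simp
  | cons m ks ih =>
      rw [List.foldl_cons, ih, PySem.Dict.getD_foldl_insert_add_one, List.countP_cons]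
      have hnd : (pvS d m).Nodup := PySem.Set.nodup_ofList _
      by_cases hx : x ∈ pvS d m
      · rw [List.count_eq_one_of_mem hnd hx]
        have hcx : (pvS d m).contains x = true := (PySem.Set.contains_iff _ _).mpr hx
        rw [hcx]
        simp only [if_pos]
        push_cast
        ring
      · rw [List.count_eq_zero_of_not_mem hx]
        have hcx : (pvS d m).contains x = false := by
          rw [← Bool.not_eq_true]
          exact fun h => hx ((PySem.Set.contains_iff _ _).mp h)
        rw [hcx]
        push_cast
        ring

-- the counter's keys are the ordered union of the per-key sets
theorem pv_counts_keys_aux (d : PySem.Dict String (List Int)) (ks : List String)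
    (c : PySem.Dict Int Int) :
    (ks.foldl (fun c m => (pvS d m).foldl (fun c x => c.insert x (c.getD x 0 + 1)) c) c).keys
      = ks.foldl (fun K m => PySem.Set.update K (pvS d m)) c.keys := by
  induction ks generalizing c with
  | nil => rfl
  | cons m ks ih =>
      rw [List.foldl_cons, ih, PySem.Dict.keys_foldl_insert, List.foldl_cons]

theorem pv_foldl_update (f : String → List Int) (ks : List String) (a : List Int) :
    ks.foldl (fun K m => PySem.Set.update K (f m)) (PySem.Set.ofList a)
      = PySem.Set.ofList (a ++ ks.flatMap f) := by
  induction ks generalizing a with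
  | nil => simp
  | cons m ks ih =>
      rw [List.foldl_cons, ← PySem.Set.ofList_append, ih, List.flatMap_cons, List.append_assoc]

theorem pv_counts_keys (d : PySem.Dict String (List Int)) (ks : List String) :
    (ks.foldl (fun c m => (pvS d m).foldl (fun c x => c.insert x (c.getD x 0 + 1)) c)
        (PySem.Dict.empty : PySem.Dict Int Int)).keys
      = PySem.Set.ofList (ks.flatMap (pvS d)) := by
  rw [pv_counts_keys_aux]
  have h0 : (PySem.Dict.empty : PySem.Dict Int Int).keys = PySem.Set.ofList ([] : List Int) := rfl
  rw [h0, pv_foldl_update]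
  rfl

-- the generic core: for any dict and a nonempty resolved key list the two bodies agree
theorem pv_core (d : PySem.Dict String (List Int)) (k0 : String) (kt : List String) :
    (match (k0 :: kt).foldl (fun acc m => acc ++ [pvS d m]) ([] : List (PySem.Set Int)) with
     | [] => ([] : List Int)
     | s0 :: _ =>
         ((k0 :: kt).foldl (fun acc m => acc ++ [pvS d m]) ([] : List (PySem.Set Int))).foldl
           (fun acc s => PySem.Set.inter acc s) s0)
    = ((((k0 :: kt).foldl
            (fun c m => (pvS d m).foldl (fun c x => c.insert x (c.getD x 0 + 1)) c)
            (PySem.Dict.empty : PySem.Dict Int Int)).items.filter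
          (fun p => p.2 == (((k0 :: kt).length : Nat) : Int))).map (fun p => p.1)) := by
  have hsets : (k0 :: kt).foldl (fun acc m => acc ++ [pvS d m]) ([] : List (PySem.Set Int))
      = (k0 :: kt).map (pvS d) := by
    simpa using PySem.List.foldl_append_singleton_eq_map (l := k0 :: kt) (f := pvS d)
      (acc := ([] : List (PySem.Set Int)))
  rw [hsets, List.map_cons]
  show (pvS d k0 :: List.map (pvS d) kt).foldl (fun acc s => PySem.Set.inter acc s) (pvS d k0) = _
  rw [pv_foldl_inter]
  set ks := k0 :: kt with hksdef
  set C := ks.foldl (fun c m => (pvS d m).foldl (fun c x => c.insert x (c.getD x 0 + 1)) c)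
    (PySem.Dict.empty : PySem.Dict Int Int) with hC
  have hkeys : C.keys = PySem.Set.ofList (ks.flatMap (pvS d)) := pv_counts_keys d ks
  have hnd : C.keys.Nodup := by rw [hkeys]; exact PySem.Set.nodup_ofList _
  rw [PySem.Dict.items_eq_map_keys C hnd 0, List.filter_map, List.map_map]
  have hmapid : ((fun p : Int × Int => p.1) ∘ fun k => (k, C.getD k 0)) = fun k => k := rfl
  rw [hmapid, List.map_id']
  -- the two filter predicates agree
  have hget : ∀ x, C.getD x 0 = ((ks.countP (fun m => (pvS d m).contains x) : Nat) : Int) := by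
    intro x
    rw [hC, pv_counts_getD]
    simp
  have hP : ∀ x : Int,
      (((fun p : Int × Int => p.2 == ((ks.length : Nat) : Int)) ∘ fun k => (k, C.getD k 0)) x)
        = ks.all (fun m => (pvS d m).contains x) := by
    intro x
    show (C.getD x 0 == ((ks.length : Nat) : Int)) = ks.all (fun m => (pvS d m).contains x)
    rw [Bool.eq_iff_iff, hget]
    simp only [beq_iff_eq, Nat.cast_inj, List.countP_eq_length, List.all_eq_true]
  rw [List.filter_congr (fun x _ => hP x)]
  -- restrict the filtered union to the first set
  rw [hkeys, List.flatMap_cons]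
  have hofl : PySem.Set.ofList (pvS d k0 ++ kt.flatMap (pvS d))
      = PySem.Set.update (pvS d k0) (kt.flatMap (pvS d)) := by
    rw [PySem.Set.ofList_append]
    show PySem.Set.update (PySem.Set.ofList (PySem.Set.ofList (PySem.Dict.getD d k0 []))) _ = _
    rw [PySem.Set.ofList_ofList]
    rfl
  rw [hofl, PySem.Set.update_eq_append_filter, List.filter_append, List.filter_filter]
  have hnil : List.filter
      (fun a => (ks.all fun m => (pvS d m).contains a) && !(pvS d k0).contains a)
      (PySem.Set.ofList (kt.flatMap (pvS d))) = [] := by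
    apply List.filter_eq_nil_iff.mpr
    intro a _
    rw [hksdef, List.all_cons]
    cases hfc : (pvS d k0).contains a <;> simp_all
  rw [hnil, List.append_nil]
  -- finally the two predicates over the first set agree
  apply List.filter_congr
  intro x _
  simp [hksdef, List.all_cons, List.all_map, Function.comp_def]

-- ===== VERDICT (by name: the statement is the Claim_ definition above) =====
theorem filter_common_spec : Claim_equal_filter_common := by
  intro subset_ids keys _ hpre
  obtain ⟨k0, kt, hks⟩ : ∃ k0 kt, pvResolved subset_ids keys = k0 :: kt := by
    rcases h : pvResolved subset_ids keys with _ | ⟨a, b⟩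
    · exact absurd h hpre.1
    · exact ⟨a, b, rfl⟩
  show filter_common subset_ids keys = filter_common_alt subset_ids keys
  unfold filter_common filter_common_alt
  rw [hks]
  exact pv_core (PySem.Dict.mk subset_ids) k0 kt
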